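-- pv_equiv track=rewrite | github.com/shalomteresa/GEOG5990M-Assignment2 | src/MCE/my_modules/geometry.py | add_rasters
-- ===== SOURCE A (Python) =====
-- def add_rasters(rasters):
--     """
--     Adds the input rasters together.
--
--     Args:
--         rasters (list): A list of 2D arrays representing rasters.
--
--     Returns:
--         list: A 2D array representing the added rasters.
--     """
--     added_raster = []
--     for row_idx in range(len(rasters[0])):
--         added_row = []
--         for col_idx in range(len(rasters[0][0])):
--             pixel_sum = sum(raster[row_idx][col_idx] for raster in rasters)
--             added_row.append(pixel_sum)
--         added_raster.append(added_row)
--     return added_raster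
-- ===== SOURCE B (Python) =====
-- def add_rasters(rasters):
--     first = rasters[0]
--     height = len(first)
--     width = len(first[0]) if height else 0
--     result = [[first[r][c] for c in range(width)] for r in range(height)]
--     for raster in rasters[1:]:
--         for r in range(height):
--             for c in range(width):
--                 result[r][c] += raster[r][c]
--     return result
-- ===== Notes on version B (the rewrite author's own statement) =====
-- stated objective: alternative
-- what changed: Instead of summing across all rasters per pixel with a generator inside nested row/col loops, B copies rasters[0] into a fresh accumulator grid and folds the remaining rasters into it one at a time with in-place element addition.
import Mathlib
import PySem

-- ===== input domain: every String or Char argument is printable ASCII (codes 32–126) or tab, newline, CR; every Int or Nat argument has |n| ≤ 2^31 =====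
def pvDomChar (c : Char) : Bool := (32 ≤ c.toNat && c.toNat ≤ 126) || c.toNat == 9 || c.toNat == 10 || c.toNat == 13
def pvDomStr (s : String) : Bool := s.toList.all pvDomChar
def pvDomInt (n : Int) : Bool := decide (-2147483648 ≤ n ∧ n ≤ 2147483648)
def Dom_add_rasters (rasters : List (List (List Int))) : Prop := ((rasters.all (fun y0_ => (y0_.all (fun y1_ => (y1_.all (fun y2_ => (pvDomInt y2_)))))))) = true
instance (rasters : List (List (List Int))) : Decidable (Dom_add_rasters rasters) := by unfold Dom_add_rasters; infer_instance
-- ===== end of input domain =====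

-- B builds the result by copying rasters[0] into an accumulator grid and folding the
-- remaining rasters into it, instead of A's per-pixel sum across all rasters (objective: alternative).

-- ===== PORT A =====
-- for row_idx in range(h): for col_idx in range(w): sum(raster[row_idx][col_idx] for raster in rasters)
def add_rasters (rasters : List (List (List Int))) : List (List Int) :=
  let r0 := rasters.headD []
  (List.range r0.length).map (fun row_idx =>
    (List.range (r0.headD []).length).map (fun col_idx =>
      rasters.foldl (fun s raster => s + ((raster.getD row_idx []).getD col_idx 0)) 0))

-- ===== PORT B =====
-- result := fresh copy of rasters[0] (dims from rasters[0]); then fold rasters[1:] in,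
-- adding element-wise: result[r][c] += raster[r][c].
def add_rasters_alt (rasters : List (List (List Int))) : List (List Int) :=
  let first := rasters.headD []
  let height := first.length
  let width := if height ≠ 0 then (first.headD []).length else 0
  let init := (List.range height).map (fun r =>
    (List.range width).map (fun c => (first.getD r []).getD c 0))
  rasters.tail.foldl (fun result raster =>
    result.mapIdx (fun r row => row.mapIdx (fun c v => v + ((raster.getD r []).getD c 0)))) init

-- ===== PRECONDITION & SPEC =====
-- Pre_ excludes exactly the inputs where the Python A raises IndexError: the empty raster
-- list, and ragged inputs where some raster lacks a row/column that rasters[0]'s dimensions demand.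
def Pre_add_rasters (rasters : List (List (List Int))) : Prop :=
  rasters ≠ [] ∧
  (0 < (rasters.headD []).length →
   0 < ((rasters.headD []).headD []).length →
   ∀ r ∈ rasters, (rasters.headD []).length ≤ r.length ∧
     ∀ i < (rasters.headD []).length,
       ((rasters.headD []).headD []).length ≤ (r.getD i []).length)
instance (rasters : List (List (List Int))) : Decidable (Pre_add_rasters rasters) := by
  unfold Pre_add_rasters; infer_instance

def pvWitness_add_rasters : List (List (List Int)) := [[[1, 2], [3, 4]], [[5, 6], [7, 8]]]

def Spec_add_rasters (rasters : List (List (List Int))) (out : List (List Int)) : Prop := out = add_rasters_alt rasters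
instance (rasters : List (List (List Int))) (out : List (List Int)) : Decidable (Spec_add_rasters rasters out) := by unfold Spec_add_rasters; infer_instance

-- ===== CLAIM (what is proved, stated in full; the proofs are below) =====
def Claim_equal_add_rasters : Prop := ∀ (rasters : List (List (List Int))), Dom_add_rasters rasters → Pre_add_rasters rasters → Spec_add_rasters rasters (add_rasters rasters)

-- ===== LEMMAS AND PROOFS =====

-- mapIdx over a grid built from ranges acts pointwise
theorem mapIdx_range_map {α β : Type} (n : Nat) (f : Nat → α) (g : Nat → α → β) :
    ((List.range n).map f).mapIdx g = (List.range n).map (fun i => g i (f i)) := by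
  apply List.ext_getElem
  · simp
  · intro i h1 h2
    simp

-- invariant of B's fold: starting from the grid of g, folding L adds the pointwise fold of L
theorem foldl_grid (L : List (List (List Int))) (h w : Nat) (g : Nat → Nat → Int) :
    L.foldl (fun result raster =>
        result.mapIdx (fun r row => row.mapIdx (fun c v => v + ((raster.getD r []).getD c 0))))
      ((List.range h).map (fun r => (List.range w).map (fun c => g r c)))
    = (List.range h).map (fun r => (List.range w).map (fun c =>
        L.foldl (fun s raster => s + ((raster.getD r []).getD c 0)) (g r c))) := by
  induction L generalizing g with
  | nil => simp
  | cons x xs ih =>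
    simp only [List.foldl_cons]
    rw [mapIdx_range_map]
    have : ((List.range h).map fun i =>
        ((List.range w).map fun c => g i c).mapIdx fun c v => v + ((x.getD i []).getD c 0))
        = (List.range h).map (fun r => (List.range w).map
            (fun c => g r c + ((x.getD r []).getD c 0))) := by
      apply List.map_congr_left
      intro i hi
      exact mapIdx_range_map w _ _
    rw [this, ih]

-- ===== VERDICT (by name: the statement is the Claim_ definition above) =====
theorem add_rasters_spec : Claim_equal_add_rasters := by
  intro rasters _ _
  unfold Spec_add_rasters add_rasters add_rasters_alt
  cases rasters with
  | nil => simp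
  | cons r0 rest =>
    simp only [List.headD_cons, List.tail_cons]
    by_cases hh : r0.length = 0
    · have h0 := foldl_grid rest 0 0 (fun _ _ => 0)
      simp only [List.range_zero, List.map_nil] at h0
      simp only [hh, List.range_zero, List.map_nil]
      exact h0.symm
    · simp only [if_pos hh, ne_eq]
      rw [foldl_grid rest r0.length (r0.headD []).length (fun r c => (r0.getD r []).getD c 0)]
      simp only [List.foldl_cons, zero_add]
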